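-- pv_equiv track=rewrite | github.com/seulmi0827/seulmi | Python/sesac_python/week4_sm/03 왼쪽 오른쪽.py | solution
-- ===== SOURCE A (Python) =====
-- def solution(str_list):
--     uldict = {"l":0,"r":0}
--     for i in range(len(str_list)):
--         if str_list[i] in uldict:
--             uldict[str_list[i]]+=1
--             if uldict["l"] == 1: return str_list[:i]
--             elif uldict["r"] == 1: return str_list[i+1:]
--     return []
-- ===== SOURCE B (Python) =====
-- def solution(str_list):
--     try:
--         li = str_list.index('l')
--     except ValueError:
--         li = None
--     try:
--         ri = str_list.index('r')
--     except ValueError: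
--         ri = None
--     if li is None:
--         return [] if ri is None else str_list[ri + 1:]
--     if ri is None or li < ri:
--         return str_list[:li]
--     return str_list[ri + 1:]
-- ===== Notes on version B (the rewrite author's own statement) =====
-- stated objective: simpler
-- what changed: Replaced the counting-dict scan with early returns by two list.index lookups for 'l' and 'r' (ValueError treated as missing) whose indices are compared once to pick the slice.
import Mathlib
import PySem

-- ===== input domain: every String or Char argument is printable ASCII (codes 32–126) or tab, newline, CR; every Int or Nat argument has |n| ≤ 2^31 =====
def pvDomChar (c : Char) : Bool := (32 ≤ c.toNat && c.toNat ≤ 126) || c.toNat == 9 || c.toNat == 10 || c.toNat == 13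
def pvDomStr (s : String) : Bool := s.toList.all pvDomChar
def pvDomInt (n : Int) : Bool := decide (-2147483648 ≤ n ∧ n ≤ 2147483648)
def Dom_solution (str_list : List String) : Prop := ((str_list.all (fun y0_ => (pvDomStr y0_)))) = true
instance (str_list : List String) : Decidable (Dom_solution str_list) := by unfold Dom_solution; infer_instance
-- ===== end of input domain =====

-- B replaces A's counting-dict scan with early returns by two list.index lookups ('l', 'r') compared once; objective: simpler.

-- ===== PORT A =====
-- A's for-loop over range(len(str_list)) with early returns, as index recursion carrying the dict
def solutionGo (str_list : List String) (uldict : PySem.Dict String Int) (i : Nat) : List String :=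
  if h : i < str_list.length then
    let x := str_list[i]
    if uldict.contains x then
      let d := uldict.insert x (uldict.getD x 0 + 1)
      if d.getD "l" 0 = 1 then PySem.List.slice str_list none (some (i : Int))
      else if d.getD "r" 0 = 1 then PySem.List.slice str_list (some ((i : Int) + 1)) none
      else solutionGo str_list d (i + 1)
    else solutionGo str_list uldict (i + 1)
  else []
termination_by str_list.length - i

def solution (str_list : List String) : List String :=
  solutionGo str_list (PySem.Dict.ofList [("l", 0), ("r", 0)]) 0

-- ===== PORT B =====
def solution_alt (str_list : List String) : List String :=
  let li := PySem.List.index? str_list "l"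
  let ri := PySem.List.index? str_list "r"
  match li, ri with
  | none, none => []
  | none, some r => PySem.List.slice str_list (some ((r : Int) + 1)) none
  | some l, none => PySem.List.slice str_list none (some ((l : Int)))
  | some l, some r =>
      if l < r then PySem.List.slice str_list none (some ((l : Int)))
      else PySem.List.slice str_list (some ((r : Int) + 1)) none

-- ===== PRECONDITION & SPEC =====
def Spec_solution (str_list : List String) (out : List String) : Prop := out = solution_alt str_list
instance (str_list : List String) (out : List String) : Decidable (Spec_solution str_list out) := by unfold Spec_solution; infer_instance

-- ===== CLAIM (what is proved, stated in full; the proofs are below) =====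
def Claim_equal_solution : Prop := ∀ (str_list : List String), Dom_solution str_list → Spec_solution str_list (solution str_list)

-- ===== LEMMAS AND PROOFS =====

-- position and kind (true = "l") of the first "l" or "r"
def firstLR : List String → Option (Nat × Bool)
  | [] => none
  | x :: xs =>
      if x = "l" then some (0, true)
      else if x = "r" then some (0, false)
      else (firstLR xs).map (fun p => (p.1 + 1, p.2))

def lrResult (l : List String) : Option (Nat × Bool) → List String
  | none => []
  | some (j, true) => l.take j
  | some (j, false) => l.drop (j + 1)

def initDict : PySem.Dict String Int := PySem.Dict.ofList [("l", 0), ("r", 0)]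

lemma initDict_getD_l : initDict.getD "l" 0 = 0 := by decide
lemma initDict_getD_r : initDict.getD "r" 0 = 0 := by decide
lemma initDict_contains_l : initDict.contains "l" = true := by decide
lemma initDict_contains_r : initDict.contains "r" = true := by decide
lemma initDict_contains_other (x : String) (hl : ¬ x = "l") (hr : ¬ x = "r") :
    initDict.contains x = false := by
  have : initDict = (PySem.Dict.empty.insert "l" 0).insert "r" 0 := by decide
  rw [this, PySem.Dict.contains_insert, PySem.Dict.contains_insert]
  simp [hl, hr, PySem.Dict.contains_empty]

lemma castsucc (i : Nat) : ((i : Int) + 1) = ((i + 1 : Nat) : Int) := by push_cast; ring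

lemma go_spec (k : Nat) (l : List String) (i : Nat) (hk : l.length - i ≤ k) :
    solutionGo l initDict i = lrResult l ((firstLR (l.drop i)).map (fun p => (i + p.1, p.2))) := by
  induction k generalizing i with
  | zero =>
      rw [solutionGo]
      simp [show ¬ i < l.length from by omega,
        List.drop_eq_nil_of_le (show l.length ≤ i from by omega), firstLR, lrResult]
  | succ k ih =>
      by_cases h : i < l.length
      · have hdrop : l.drop i = l[i] :: l.drop (i + 1) := List.drop_eq_getElem_cons h
        rw [solutionGo]
        simp only [h, dif_pos]
        by_cases hl : l[i] = "l"
        · rw [hdrop, firstLR, PySem.List.slice_to_natCast]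
          simp [hl, initDict_contains_l, initDict_getD_l, lrResult]
        · by_cases hr : l[i] = "r"
          · rw [hdrop, firstLR, castsucc i, PySem.List.slice_from_natCast]
            simp [hr, initDict_contains_r, initDict_getD_r, lrResult]
            intro hx
            exact absurd hx (by decide)
          · rw [hdrop, firstLR]
            simp only [initDict_contains_other l[i] hl hr, Bool.false_eq_true, if_false, hl, hr]
            rw [ih (i + 1) (by omega)]
            cases hF : firstLR (l.drop (i + 1)) with
            | none => simp [lrResult]
            | some p =>
                cases p with
                | mk j b =>
                    have harith : i + 1 + j = i + (j + 1) := by omega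
                    cases b <;> simp [lrResult, harith]
      · rw [solutionGo]
        simp [h, List.drop_eq_nil_of_le (show l.length ≤ i from by omega), firstLR, lrResult]

def combineLR : Option Nat → Option Nat → Option (Nat × Bool)
  | none, none => none
  | some i, none => some (i, true)
  | none, some j => some (j, false)
  | some i, some j => if i < j then some (i, true) else some (j, false)

lemma index?_cons_ne (x v : String) (xs : List String) (h : x ≠ v) :
    PySem.List.index? (x :: xs) v = (PySem.List.index? xs v).map (· + 1) :=
  PySem.List.index?_cons_of_ne xs h

lemma firstLR_eq_combine (l : List String) :
    firstLR l = combineLR (PySem.List.index? l "l") (PySem.List.index? l "r") := by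
  induction l with
  | nil => simp [firstLR, combineLR]
  | cons x xs ih =>
      by_cases hl : x = "l"
      · subst hl
        rw [PySem.List.index?_cons_self, index?_cons_ne "l" "r" xs (by decide), firstLR]
        cases PySem.List.index? xs "r" <;> simp [combineLR]
      · by_cases hr : x = "r"
        · subst hr
          rw [PySem.List.index?_cons_self, index?_cons_ne "r" "l" xs (by decide), firstLR]
          cases PySem.List.index? xs "l" <;> simp [hl, combineLR]
        · rw [firstLR, index?_cons_ne x "l" xs hl, index?_cons_ne x "r" xs hr, ih]
          cases PySem.List.index? xs "l" with
          | none => cases PySem.List.index? xs "r" <;> simp [hl, hr, combineLR]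
          | some a =>
              cases PySem.List.index? xs "r" with
              | none => simp [hl, hr, combineLR]
              | some b =>
                  simp only [hl, hr, if_false, combineLR, Option.map_some]
                  by_cases hab : a < b <;> simp [hab]

lemma slice_from_succ (l : List String) (r : Nat) :
    PySem.List.slice l (some ((r : Int) + 1)) none = l.drop (r + 1) := by
  rw [castsucc r, PySem.List.slice_from_natCast]

lemma alt_spec (l : List String) : solution_alt l = lrResult l (firstLR l) := by
  rw [firstLR_eq_combine]
  simp only [solution_alt]
  cases hL : PySem.List.index? l "l" with
  | none =>
      cases hR : PySem.List.index? l "r" with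
      | none => simp [combineLR, lrResult]
      | some r => simp [combineLR, lrResult, slice_from_succ]
  | some a =>
      cases hR : PySem.List.index? l "r" with
      | none => simp [combineLR, lrResult, PySem.List.slice_to_natCast]
      | some r =>
          by_cases hab : a < r
          · simp [combineLR, hab, lrResult, PySem.List.slice_to_natCast]
          · simp [combineLR, hab, lrResult, slice_from_succ]

-- ===== VERDICT (by name: the statement is the Claim_ definition above) =====
theorem solution_spec : Claim_equal_solution := by
  intro l _
  show solution l = solution_alt l
  rw [solution, show (PySem.Dict.ofList [("l", (0:Int)), ("r", 0)]) = initDict from rfl,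
    go_spec l.length l 0 (by omega), alt_spec]
  simp
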